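-- pv_equiv track=rewrite | github.com/Shamini-tech/Project_drone | backend/ai/postprocess.py | to_alerts
-- ===== SOURCE A (Python) =====
-- def to_alerts(detections):
--     """
--     detections: list of dicts {label, confidence, bbox}
--     returns: alert string
--     """
--     labels = {d['label'].lower() for d in detections}
--     if 'person' in labels:
--         return "PERSON_DETECTED"
--     if 'car' in labels or 'vehicle' in labels:
--         return "VEHICLE_DETECTED"
--     if 'fire' in labels or 'smoke' in labels:
--         return "FIRE_DETECTED"
--     return "NO_THREAT"
-- ===== SOURCE B (Python) =====
-- _RANK = {'person': 0, 'car': 1, 'vehicle': 1, 'fire': 2, 'smoke': 2}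
-- _ALERT = ["PERSON_DETECTED", "VEHICLE_DETECTED", "FIRE_DETECTED", "NO_THREAT"]
--
-- def to_alerts(detections):
--     best = 3
--     for d in detections:
--         best = min(best, _RANK.get(d['label'].lower(), 3))
--     return _ALERT[best]
-- ===== Notes on version B (the rewrite author's own statement) =====
-- stated objective: simpler
-- what changed: Replaces the build-a-set-then-cascade-of-ifs with a single min-reduction over a label-to-rank table followed by one index into an alert list.
import Mathlib
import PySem

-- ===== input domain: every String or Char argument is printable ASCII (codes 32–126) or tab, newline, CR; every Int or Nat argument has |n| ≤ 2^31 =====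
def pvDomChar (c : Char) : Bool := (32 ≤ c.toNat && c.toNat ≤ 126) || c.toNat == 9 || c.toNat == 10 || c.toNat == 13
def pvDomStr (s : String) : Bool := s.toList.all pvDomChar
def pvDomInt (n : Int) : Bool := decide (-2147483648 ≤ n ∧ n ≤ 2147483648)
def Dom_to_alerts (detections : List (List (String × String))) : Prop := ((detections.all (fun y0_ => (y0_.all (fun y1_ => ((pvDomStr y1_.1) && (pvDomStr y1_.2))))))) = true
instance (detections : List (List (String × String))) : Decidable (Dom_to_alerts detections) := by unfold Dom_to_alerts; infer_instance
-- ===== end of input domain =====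

-- B replaces A's set-build plus if-cascade by a min-reduction over a rank table and one list index (simpler; same O(n)).

-- ===== PORT A =====
-- d['label'] : first match in the association list; the .getD "" is a totality wrapper, Pre_ excludes missing keys
def pvLabel (d : List (String × String)) : String :=
  PySem.Str.lower (((PySem.Dict.mk d).get? "label").getD "")

def to_alerts (detections : List (List (String × String))) : String :=
  let labels : PySem.Set String := PySem.Set.ofList (detections.map pvLabel)
  if labels.contains "person" then "PERSON_DETECTED"
  else if labels.contains "car" || labels.contains "vehicle" then "VEHICLE_DETECTED"
  else if labels.contains "fire" || labels.contains "smoke" then "FIRE_DETECTED"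
  else "NO_THREAT"

-- ===== PORT B =====
def pvRank : PySem.Dict String Int :=
  PySem.Dict.mk [("person", 0), ("car", 1), ("vehicle", 1), ("fire", 2), ("smoke", 2)]

def pvAlert : List String := ["PERSON_DETECTED", "VEHICLE_DETECTED", "FIRE_DETECTED", "NO_THREAT"]

def to_alerts_alt (detections : List (List (String × String))) : String :=
  let best : Int := detections.foldl (fun b d => min b (pvRank.getD (pvLabel d) 3)) 3
  (PySem.List.pyGet? pvAlert best).getD ""

-- ===== PRECONDITION & SPEC =====
-- Pre_ excludes inputs where some detection dict lacks the key "label": there Python A raises KeyError.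
def Pre_to_alerts (detections : List (List (String × String))) : Prop :=
  (detections.all (fun d => (PySem.Dict.mk d).contains "label")) = true
instance (detections : List (List (String × String))) : Decidable (Pre_to_alerts detections) := by unfold Pre_to_alerts; infer_instance

def pvWitness_to_alerts : (List (List (String × String))) :=
  [[("label", "Car"), ("confidence", "0.9")], [("label", "smoke")]]

def Spec_to_alerts (detections : List (List (String × String))) (out : String) : Prop := out = to_alerts_alt detections
instance (detections : List (List (String × String))) (out : String) : Decidable (Spec_to_alerts detections out) := by unfold Spec_to_alerts; infer_instance

-- ===== CLAIM (what is proved, stated in full; the proofs are below) =====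
def Claim_equal_to_alerts : Prop := ∀ (detections : List (List (String × String))), Dom_to_alerts detections → Pre_to_alerts detections → Spec_to_alerts detections (to_alerts detections)

-- ===== LEMMAS AND PROOFS =====

def pvR (d : List (String × String)) : Int := pvRank.getD (pvLabel d) 3

lemma pvR_nonneg (d : List (String × String)) : 0 ≤ pvR d := by
  simp only [pvR, pvRank, PySem.Dict.getD_eq_get?_getD, PySem.Dict.get?_mk_cons]
  split_ifs <;> simp [Option.getD, PySem.Dict.get?]

lemma pvR_le (d : List (String × String)) : pvR d ≤ 3 := by
  simp only [pvR, pvRank, PySem.Dict.getD_eq_get?_getD, PySem.Dict.get?_mk_cons]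
  split_ifs <;> simp [Option.getD, PySem.Dict.get?]

lemma pvR_eq_zero (d : List (String × String)) : pvR d = 0 ↔ "person" = pvLabel d := by
  simp only [pvR, pvRank, PySem.Dict.getD_eq_get?_getD, PySem.Dict.get?_mk_cons]
  split_ifs <;> simp only [beq_iff_eq] at * <;> simp_all [Option.getD, PySem.Dict.get?]

lemma pvR_eq_one (d : List (String × String)) : pvR d = 1 ↔ ("car" = pvLabel d ∨ "vehicle" = pvLabel d) := by
  simp only [pvR, pvRank, PySem.Dict.getD_eq_get?_getD, PySem.Dict.get?_mk_cons]
  split_ifs <;> simp only [beq_iff_eq] at * <;> simp_all [Option.getD, PySem.Dict.get?] <;>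
    (rename_i hq; exact ⟨fun q => absurd (hq.trans q.symm) (by decide), fun q => absurd (hq.trans q.symm) (by decide)⟩)

lemma pvR_eq_two (d : List (String × String)) : pvR d = 2 ↔ ("fire" = pvLabel d ∨ "smoke" = pvLabel d) := by
  simp only [pvR, pvRank, PySem.Dict.getD_eq_get?_getD, PySem.Dict.get?_mk_cons]
  split_ifs <;> simp only [beq_iff_eq] at * <;> simp_all [Option.getD, PySem.Dict.get?] <;>
    (rename_i hq; exact ⟨fun q => absurd (hq.trans q.symm) (by decide), fun q => absurd (hq.trans q.symm) (by decide)⟩)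

-- foldl of min with accumulator b ≤ 3 equals min of b and the foldr form
lemma foldl_min_eq_foldr (L : List (List (String × String))) :
    ∀ b : Int, b ≤ 3 → L.foldl (fun b d => min b (pvR d)) b = min b (L.foldr (fun d m => min (pvR d) m) 3) := by
  induction L with
  | nil => intro b hb; simp; omega
  | cons d L ih =>
    intro b hb
    simp only [List.foldl_cons, List.foldr_cons]
    rw [ih (min b (pvR d)) (by have := pvR_le d; omega)]
    have := pvR_le d
    have := pvR_nonneg d
    omega

-- characterization of the min-reduction
lemma foldr_min_char (L : List (List (String × String))) :
    L.foldr (fun d m => min (pvR d) m) 3 =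
      if ∃ d ∈ L, pvR d = 0 then 0
      else if ∃ d ∈ L, pvR d = 1 then 1
      else if ∃ d ∈ L, pvR d = 2 then 2
      else 3 := by
  induction L with
  | nil => simp
  | cons a L ih =>
    have h0 := pvR_nonneg a
    have h3 := pvR_le a
    have hc : pvR a = 0 ∨ pvR a = 1 ∨ pvR a = 2 ∨ pvR a = 3 := by omega
    simp only [List.foldr_cons, ih]
    by_cases m0 : ∃ d ∈ L, pvR d = 0 <;> by_cases m1 : ∃ d ∈ L, pvR d = 1 <;>
      by_cases m2 : ∃ d ∈ L, pvR d = 2 <;> rcases hc with h | h | h | h <;>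
        simp [h, m0, m1, m2]

-- ===== VERDICT (by name: the statement is the Claim_ definition above) =====
theorem to_alerts_spec : Claim_equal_to_alerts := by
  intro detections _ _
  unfold Spec_to_alerts to_alerts to_alerts_alt
  show _ = (PySem.List.pyGet? pvAlert (detections.foldl (fun b d => min b (pvR d)) 3)).getD ""
  rw [foldl_min_eq_foldr detections 3 le_rfl, foldr_min_char]
  have cP : (PySem.Set.ofList (detections.map pvLabel)).contains "person" = true ↔ ∃ d ∈ detections, pvR d = 0 := by
    rw [PySem.Set.contains_iff, PySem.Set.mem_ofList, List.mem_map]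
    constructor
    · rintro ⟨d, hd, h⟩; exact ⟨d, hd, (pvR_eq_zero d).2 h.symm⟩
    · rintro ⟨d, hd, h⟩; exact ⟨d, hd, ((pvR_eq_zero d).1 h).symm⟩
  have cV : ((PySem.Set.ofList (detections.map pvLabel)).contains "car"
      || (PySem.Set.ofList (detections.map pvLabel)).contains "vehicle") = true ↔ ∃ d ∈ detections, pvR d = 1 := by
    rw [Bool.or_eq_true, PySem.Set.contains_iff, PySem.Set.contains_iff,
        PySem.Set.mem_ofList, PySem.Set.mem_ofList, List.mem_map, List.mem_map]
    constructor
    · rintro (⟨d, hd, h⟩ | ⟨d, hd, h⟩)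
      · exact ⟨d, hd, (pvR_eq_one d).2 (Or.inl h.symm)⟩
      · exact ⟨d, hd, (pvR_eq_one d).2 (Or.inr h.symm)⟩
    · rintro ⟨d, hd, h⟩
      rcases (pvR_eq_one d).1 h with h' | h'
      · exact Or.inl ⟨d, hd, h'.symm⟩
      · exact Or.inr ⟨d, hd, h'.symm⟩
  have cF : ((PySem.Set.ofList (detections.map pvLabel)).contains "fire"
      || (PySem.Set.ofList (detections.map pvLabel)).contains "smoke") = true ↔ ∃ d ∈ detections, pvR d = 2 := by
    rw [Bool.or_eq_true, PySem.Set.contains_iff, PySem.Set.contains_iff,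
        PySem.Set.mem_ofList, PySem.Set.mem_ofList, List.mem_map, List.mem_map]
    constructor
    · rintro (⟨d, hd, h⟩ | ⟨d, hd, h⟩)
      · exact ⟨d, hd, (pvR_eq_two d).2 (Or.inl h.symm)⟩
      · exact ⟨d, hd, (pvR_eq_two d).2 (Or.inr h.symm)⟩
    · rintro ⟨d, hd, h⟩
      rcases (pvR_eq_two d).1 h with h' | h'
      · exact Or.inl ⟨d, hd, h'.symm⟩
      · exact Or.inr ⟨d, hd, h'.symm⟩
  by_cases hP : ∃ d ∈ detections, pvR d = 0
  · rw [if_pos (cP.2 hP), if_pos hP]; rfl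
  · rw [if_neg (fun h => hP (cP.1 h)), if_neg hP]
    by_cases hV : ∃ d ∈ detections, pvR d = 1
    · rw [if_pos (cV.2 hV), if_pos hV]; rfl
    · rw [if_neg (fun h => hV (cV.1 h)), if_neg hV]
      by_cases hF : ∃ d ∈ detections, pvR d = 2
      · rw [if_pos (cF.2 hF), if_pos hF]; rfl
      · rw [if_neg (fun h => hF (cF.1 h)), if_neg hF]; rfl
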